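-- pv_equiv track=rewrite | github.com/trandangduat/INT3117_1_homework | kiem-thu-dong-du-lieu/source.py | check_robot_status
-- ===== SOURCE A (Python) =====
-- def check_robot_status(R, C, energy, obstacles):
--     """
--     Kiểm tra trạng thái robot dọn nhà.
--
--     R, C      : vị trí hiện tại của robot (hàng, cột)
--     energy    : năng lượng hiện tại của robot (0 -> 100)
--     obstacles : danh sách các vị trí vật cản dạng list of tuples [(r1,c1), (r2,c2), ...]
--     """
--
--     if R < 1 or R > 5 or C < 1 or C > 7:
--         return "NOT OK"
--
--     if 1 <= R <= 2 and 4 <= C <= 7: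
--         return "NOT OK"
--
--     i = 0
--     while i < len(obstacles):
--         if (energy < 10):
--             return "NEED CHARGING"
--
--         energy -= 10
--         if obstacles[i][0] == R and obstacles[i][1] == C:
--             return "NOT OK"
--         i += 1
--
--
--     return "OK"
-- ===== SOURCE B (Python) =====
-- def check_robot_status(R, C, energy, obstacles):
--     if R < 1 or R > 5 or C < 1 or C > 7:
--         return "NOT OK"
--     if 1 <= R <= 2 and 4 <= C <= 7:
--         return "NOT OK"
--     budget = max(0, energy // 10)
--     if any(o[0] == R and o[1] == C for o in obstacles[:budget]):
--         return "NOT OK"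
--     if len(obstacles) > budget:
--         return "NEED CHARGING"
--     return "OK"
-- ===== Notes on version B (the rewrite author's own statement) =====
-- stated objective: simpler
-- what changed: Replaces the energy-decrementing while loop with a closed-form budget = max(0, energy // 10) and a single any() scan over obstacles[:budget].
import Mathlib
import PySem

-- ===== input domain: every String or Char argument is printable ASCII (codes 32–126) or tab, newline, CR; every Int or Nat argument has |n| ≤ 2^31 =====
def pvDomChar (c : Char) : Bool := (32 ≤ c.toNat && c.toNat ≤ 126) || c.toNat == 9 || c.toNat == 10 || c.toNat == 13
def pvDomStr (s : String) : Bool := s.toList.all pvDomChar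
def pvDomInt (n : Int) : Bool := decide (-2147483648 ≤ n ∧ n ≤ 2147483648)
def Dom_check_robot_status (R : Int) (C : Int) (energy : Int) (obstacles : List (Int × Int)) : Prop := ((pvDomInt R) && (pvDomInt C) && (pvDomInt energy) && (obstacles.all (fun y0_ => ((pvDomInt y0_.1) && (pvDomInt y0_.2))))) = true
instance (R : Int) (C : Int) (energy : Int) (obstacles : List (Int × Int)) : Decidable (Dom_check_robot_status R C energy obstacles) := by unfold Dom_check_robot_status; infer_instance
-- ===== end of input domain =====

-- B replaces A's energy-decrementing while loop by a closed-form budget and a single scan (objective: simpler).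

-- ===== PORT A =====
-- A's while loop: checks energy, subtracts 10, compares the next obstacle.
def pvLoopA (R C : Int) (energy : Int) : List (Int × Int) → String
  | [] => "OK"
  | o :: rest =>
    if energy < 10 then "NEED CHARGING"
    else if o.1 == R && o.2 == C then "NOT OK"
    else pvLoopA R C (energy - 10) rest

def check_robot_status (R : Int) (C : Int) (energy : Int) (obstacles : List (Int × Int)) : String :=
  if R < 1 ∨ R > 5 ∨ C < 1 ∨ C > 7 then "NOT OK"
  else if 1 ≤ R ∧ R ≤ 2 ∧ 4 ≤ C ∧ C ≤ 7 then "NOT OK"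
  else pvLoopA R C energy obstacles

-- ===== PORT B =====
def check_robot_status_alt (R : Int) (C : Int) (energy : Int) (obstacles : List (Int × Int)) : String :=
  if R < 1 ∨ R > 5 ∨ C < 1 ∨ C > 7 then "NOT OK"
  else if 1 ≤ R ∧ R ≤ 2 ∧ 4 ≤ C ∧ C ≤ 7 then "NOT OK"
  else if (PySem.List.slice obstacles none (some (max 0 (PySem.Int.floordiv energy 10)))).any
      (fun o => o.1 == R && o.2 == C) then "NOT OK"
  else if (obstacles.length : Int) > max 0 (PySem.Int.floordiv energy 10) then "NEED CHARGING"
  else "OK"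

-- ===== PRECONDITION & SPEC =====
def Spec_check_robot_status (R : Int) (C : Int) (energy : Int) (obstacles : List (Int × Int)) (out : String) : Prop := out = check_robot_status_alt R C energy obstacles
instance (R : Int) (C : Int) (energy : Int) (obstacles : List (Int × Int)) (out : String) : Decidable (Spec_check_robot_status R C energy obstacles out) := by unfold Spec_check_robot_status; infer_instance

-- ===== CLAIM (what is proved, stated in full; the proofs are below) =====
def Claim_equal_check_robot_status : Prop := ∀ (R : Int) (C : Int) (energy : Int) (obstacles : List (Int × Int)), Dom_check_robot_status R C energy obstacles → Spec_check_robot_status R C energy obstacles (check_robot_status R C energy obstacles)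

-- ===== LEMMAS AND PROOFS =====

-- Python's xs[:b] with a nonnegative int bound is List.take b.toNat.
lemma pv_slice_take (xs : List (Int × Int)) (b : Int) (hb : 0 ≤ b) :
    PySem.List.slice xs none (some b) = xs.take b.toNat := by
  have h := PySem.List.slice_to_natCast xs b.toNat
  rwa [Int.toNat_of_nonneg hb] at h

-- energy < 10 → budget = 0
lemma pv_budget_zero (energy : Int) (h : energy < 10) :
    max 0 (PySem.Int.floordiv energy 10) = 0 := by
  have h1 : PySem.Int.floordiv energy 10 < 1 :=
    (PySem.Int.floordiv_lt_iff_lt_mul (a := energy) (b := 10) (q := 1) (by omega)).2 (by omega)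
  omega

-- energy ≥ 10 → budget = budget(energy - 10) + 1
lemma pv_budget_succ (energy : Int) (h : ¬ energy < 10) :
    max 0 (PySem.Int.floordiv energy 10) =
      max 0 (PySem.Int.floordiv (energy - 10) 10) + 1 := by
  have h1 : 1 ≤ PySem.Int.floordiv energy 10 :=
    (PySem.Int.le_floordiv_iff_mul_le (a := energy) (b := 10) (q := 1) (by omega)).2 (by omega)
  have h3 := (PySem.Int.floordiv_eq_iff_of_pos (a := energy) (b := 10)
      (q := PySem.Int.floordiv energy 10) (by omega)).1 rfl
  have h2 : PySem.Int.floordiv (energy - 10) 10 = PySem.Int.floordiv energy 10 - 1 := by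
    rw [PySem.Int.floordiv_eq_iff_of_pos (by omega)]
    constructor <;> [linarith [h3.1]; linarith [h3.2]]
  omega

-- The loop of A computes B's budget-based formula.
lemma pv_loop_eq (R C : Int) (obs : List (Int × Int)) : ∀ energy : Int,
    pvLoopA R C energy obs =
      (if (obs.take (max 0 (PySem.Int.floordiv energy 10)).toNat).any
          (fun o => o.1 == R && o.2 == C) then "NOT OK"
       else if (obs.length : Int) > max 0 (PySem.Int.floordiv energy 10) then "NEED CHARGING"
       else "OK") := by
  induction obs with
  | nil =>
    intro energy
    have hb : ¬ ((List.length ([] : List (Int × Int)) : Int) > max 0 (PySem.Int.floordiv energy 10)) := by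
      simp only [List.length_nil, Int.natCast_zero]; omega
    simp only [pvLoopA, List.take_nil, List.any_nil, Bool.false_eq_true, if_false, if_neg hb]
  | cons o rest ih =>
    intro energy
    by_cases h : energy < 10
    · rw [pv_budget_zero energy h]
      have hl : ((o :: rest).length : Int) > 0 := by
        simp only [List.length_cons]; omega
      simp only [pvLoopA, if_pos h, Int.toNat_zero, List.take_zero, List.any_nil,
        Bool.false_eq_true, if_false, if_pos hl]
    · have hb := pv_budget_succ energy h
      have hnn : 0 ≤ max 0 (PySem.Int.floordiv (energy - 10) 10) := le_max_left _ _
      have ht : (max 0 (PySem.Int.floordiv (energy - 10) 10) + 1).toNat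
          = (max 0 (PySem.Int.floordiv (energy - 10) 10)).toNat + 1 := by omega
      simp only [pvLoopA, if_neg h, hb, ht, List.take_succ_cons, List.any_cons]
      by_cases hm : (o.1 == R && o.2 == C) = true
      · simp [hm]
      · rw [if_neg hm, ih (energy - 10)]
        have hc1 : ((o.1 == R && o.2 == C) ||
            (rest.take (max 0 (PySem.Int.floordiv (energy - 10) 10)).toNat).any
              (fun o => o.1 == R && o.2 == C))
            = (rest.take (max 0 (PySem.Int.floordiv (energy - 10) 10)).toNat).any
              (fun o => o.1 == R && o.2 == C) := by
          rw [Bool.eq_false_iff.2 hm, Bool.false_or]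
        have hlen : ((o :: rest).length : Int) = (rest.length : Int) + 1 := by
          simp only [List.length_cons]; push_cast; ring
        rw [hc1, hlen]
        simp only [show ((rest.length : Int) + 1 > max 0 (PySem.Int.floordiv (energy - 10) 10) + 1)
            ↔ ((rest.length : Int) > max 0 (PySem.Int.floordiv (energy - 10) 10)) from by omega]

-- ===== VERDICT (by name: the statement is the Claim_ definition above) =====
theorem check_robot_status_spec : Claim_equal_check_robot_status := by
  intro R C energy obstacles _
  unfold Spec_check_robot_status check_robot_status check_robot_status_alt
  rw [pv_slice_take _ _ (le_max_left _ _), pv_loop_eq R C obstacles energy]
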